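-- pv_equiv track=rewrite | github.com/AinoL/aoc2024 | 2_reactor/script2.py | check_ascending
-- ===== SOURCE A (Python) =====
-- def check_ascending(r, check):
--         # Check if everything in report is ascending normally
--         if all(r[i] < r[i+1] and not r[i] <= r[i+1]-4 for i in range(0,len(r)-1)):
--             # All good, return true
--             return True
--         elif (check):
--             # Assume nothing works
--             safe_with_mods = False
--             # Loop through all variations of once modified report
--             for i in range(0, len(r)):
--                # Make a copy for every possibility to not modify the original list
--                new_r = r.copy()
--                del new_r[i]
--                # Recurse the original loop, change check boolean to false to not go here again
--                # If any of the modifications worked, add that to a counter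
--                safe_with_mods += check_ascending(new_r, False)
--             if safe_with_mods > 0:
--                 # A working modification found, return true
--                 return True
--             else:
--                 # Nothing worked, return false
--                 return False
--         else:
--             # Nothing worked and boolean won't allow check anymore because this is second round, return false
--             return False
-- ===== SOURCE B (Python) =====
-- def _first_bad(xs):
--     # index of the first adjacent pair whose difference is not in 1..3, else None
--     for i in range(len(xs) - 1):
--         d = xs[i + 1] - xs[i]
--         if d < 1 or d > 3:
--             return i
--     return None
--
--
-- def check_ascending(r, check):
--     i = _first_bad(r)
--     if i is None:
--         return True
--     if not check:
--         return False
--     # only deleting one of the two elements of the first bad pair can help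
--     return (_first_bad(r[:i] + r[i + 1:]) is None
--             or _first_bad(r[:i + 1] + r[i + 2:]) is None)
-- ===== Notes on version B (the rewrite author's own statement) =====
-- stated objective: alternative
-- what changed: Instead of re-running the full ascending scan after deleting every index, B scans once for the first bad adjacent pair and only tests deleting one of that pair's two elements.
import Mathlib
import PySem

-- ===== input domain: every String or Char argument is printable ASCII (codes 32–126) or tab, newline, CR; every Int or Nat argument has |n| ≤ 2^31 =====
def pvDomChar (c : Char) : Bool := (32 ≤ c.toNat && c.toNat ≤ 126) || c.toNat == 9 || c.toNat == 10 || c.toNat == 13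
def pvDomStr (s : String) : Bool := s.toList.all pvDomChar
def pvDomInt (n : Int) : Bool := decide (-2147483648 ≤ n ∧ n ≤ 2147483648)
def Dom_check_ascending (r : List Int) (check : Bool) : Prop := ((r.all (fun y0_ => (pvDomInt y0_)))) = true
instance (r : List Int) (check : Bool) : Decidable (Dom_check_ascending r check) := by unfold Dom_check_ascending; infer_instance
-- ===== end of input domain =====

-- B replaces A's try-deleting-every-index retry by a single scan that, on the first bad
-- adjacent pair, only tests deleting one of that pair's two elements.

-- ===== PORT A =====
-- the `all(...)` generator of A, as a helper (A evaluates exactly this expression)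
def pvAAll (r : List Int) : Bool :=
  (PySem.List.pyRange 0 ((r.length : Int) - 1) 1).all (fun i =>
    decide (PySem.List.pyGetD r i 0 < PySem.List.pyGetD r (i + 1) 0) &&
    !decide (PySem.List.pyGetD r i 0 ≤ PySem.List.pyGetD r (i + 1) 0 - 4))

def check_ascending (r : List Int) (check : Bool) : Bool :=
  if pvAAll r then
    true
  else if check then
    let safe_with_mods : Int :=
      (PySem.List.pyRange 0 (r.length : Int) 1).foldl
        (fun acc i =>
          -- new_r = r.copy(); del new_r[i]  (pop? never fails: i is in range)
          acc + (if check_ascending (((PySem.List.pop? r i).map Prod.snd).getD []) false then 1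
                 else 0)) 0
    if safe_with_mods > 0 then true else false
  else
    false
termination_by (if check then 1 else 0 : Nat)
decreasing_by simp_all

-- ===== PORT B =====
-- _first_bad: index of the first adjacent pair whose difference is not in 1..3, else none
def pvFirstBad : List Int → Option Nat
  | a :: b :: t =>
    if b - a < 1 ∨ b - a > 3 then some 0
    else (pvFirstBad (b :: t)).map (· + 1)
  | _ => none

def check_ascending_alt (r : List Int) (check : Bool) : Bool :=
  match pvFirstBad r with
  | none => true
  | some i =>
    if !check then false
    else
      (pvFirstBad (r.take i ++ r.drop (i + 1)) == none) ||      -- r[:i] + r[i+1:]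
      (pvFirstBad (r.take (i + 1) ++ r.drop (i + 2)) == none)   -- r[:i+1] + r[i+2:]

-- ===== PRECONDITION & SPEC =====
def Spec_check_ascending (r : List Int) (check : Bool) (out : Bool) : Prop := out = check_ascending_alt r check
instance (r : List Int) (check : Bool) (out : Bool) : Decidable (Spec_check_ascending r check out) := by unfold Spec_check_ascending; infer_instance

-- ===== CLAIM (what is proved, stated in full; the proofs are below) =====
def Claim_equal_check_ascending : Prop := ∀ (r : List Int) (check : Bool), Dom_check_ascending r check → Spec_check_ascending r check (check_ascending r check)

-- ===== LEMMAS AND PROOFS =====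

-- index-level notion of a good adjacent pair
def pvSafe (r : List Int) : Prop := ∀ k, (h : k + 1 < r.length) → 1 ≤ r[k + 1] - r[k]'(by omega) ∧ r[k + 1] - r[k]'(by omega) ≤ 3

theorem pvSafe_cons (a b : Int) (t : List Int) :
    pvSafe (a :: b :: t) ↔ (1 ≤ b - a ∧ b - a ≤ 3) ∧ pvSafe (b :: t) := by
  constructor
  · intro h
    refine ⟨by simpa using h 0 (by simp), fun k hk => ?_⟩
    simpa using h (k + 1) (by simp at hk ⊢; omega)
  · rintro ⟨h1, h2⟩ k hk
    cases k with
    | zero => simpa using h1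
    | succ k => simpa using h2 k (by simp at hk ⊢; omega)

theorem pvSafe_short (r : List Int) (h : r.length ≤ 1) : pvSafe r := by
  intro k hk; omega

theorem pvAAll_iff (r : List Int) : pvAAll r = true ↔ pvSafe r := by
  unfold pvAAll pvSafe
  rw [List.all_eq_true]
  constructor
  · intro h k hk
    have hmem : (k : Int) ∈ PySem.List.pyRange 0 ((r.length : Int) - 1) 1 := by
      rw [PySem.List.mem_pyRange_one]; omega
    have hh := h _ hmem
    rw [PySem.List.pyGetD_eq_getElem r 0 (by omega) (by omega),
        PySem.List.pyGetD_eq_getElem r 0 (by omega) (by omega)] at hh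
    simp only [Bool.and_eq_true, Bool.not_eq_true', decide_eq_true_eq, decide_eq_false_iff_not] at hh
    have e1 : ((k : Int)).toNat = k := by omega
    have e2 : ((k : Int) + 1).toNat = k + 1 := by omega
    simp only [e1, e2] at hh
    omega
  · intro h i hi
    rw [PySem.List.mem_pyRange_one] at hi
    have hk : i.toNat + 1 < r.length := by omega
    rw [PySem.List.pyGetD_eq_getElem r 0 (by omega) (by omega),
        PySem.List.pyGetD_eq_getElem r 0 (by omega) (by omega)]
    have e2 : (i + 1).toNat = i.toNat + 1 := by omega
    simp only [e2]
    have := h i.toNat hk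
    simp only [Bool.and_eq_true, Bool.not_eq_true', decide_eq_true_eq, decide_eq_false_iff_not]
    omega

theorem pvFirstBad_none_iff (r : List Int) : pvFirstBad r = none ↔ pvSafe r := by
  induction r with
  | nil => simp [pvFirstBad, pvSafe_short]
  | cons a t ih =>
    cases t with
    | nil => simp [pvFirstBad, pvSafe_short]
    | cons b t' =>
      rw [pvFirstBad, pvSafe_cons]
      by_cases hb : b - a < 1 ∨ b - a > 3
      · simp [hb]; omega
      · simp [hb, ih]; omega

theorem pvFirstBad_some (r : List Int) (i : Nat) (h : pvFirstBad r = some i) :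
    ∃ hlt : i + 1 < r.length, ¬ (1 ≤ r[i + 1] - r[i]'(by omega) ∧ r[i + 1] - r[i]'(by omega) ≤ 3) := by
  induction r generalizing i with
  | nil => simp [pvFirstBad] at h
  | cons a t ih =>
    cases t with
    | nil => simp [pvFirstBad] at h
    | cons b t' =>
      rw [pvFirstBad] at h
      by_cases hb : b - a < 1 ∨ b - a > 3
      · simp [hb] at h
        subst h
        exact ⟨by simp, by simp; omega⟩
      · simp [hb] at h
        obtain ⟨j, hj, rfl⟩ := h
        obtain ⟨hlt, hbad⟩ := ih j hj
        exact ⟨by simpa using Nat.succ_lt_succ hlt, by simpa using hbad⟩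

-- deleting an index away from a bad pair cannot make the list safe
theorem pvErase_not_safe (r : List Int) (i j : Nat) (hi : i + 1 < r.length)
    (hbad : ¬ (1 ≤ r[i + 1] - r[i]'(by omega) ∧ r[i + 1] - r[i]'(by omega) ≤ 3))
    (hj : j < r.length) (hji : j ≠ i) (hji1 : j ≠ i + 1) : ¬ pvSafe (r.eraseIdx j) := by
  intro hsafe
  have hlen : (r.eraseIdx j).length = r.length - 1 := by
    simp [List.length_eraseIdx, hj]
  rcases Nat.lt_or_ge j i with hlt | hge
  · have hk : (i - 1) + 1 < (r.eraseIdx j).length := by omega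
    have hgood := hsafe (i - 1) hk
    rw [List.getElem_eraseIdx, List.getElem_eraseIdx] at hgood
    rw [dif_neg (by omega), dif_neg (by omega)] at hgood
    have e : i - 1 + 1 = i := by omega
    simp only [e] at hgood
    exact hbad hgood
  · have hge2 : i + 2 ≤ j := by omega
    have hk : i + 1 < (r.eraseIdx j).length := by omega
    have hgood := hsafe i hk
    rw [List.getElem_eraseIdx, List.getElem_eraseIdx] at hgood
    rw [dif_pos (by omega), dif_pos (by omega)] at hgood
    exact hbad hgood

theorem check_ascending_false (r : List Int) : check_ascending r false = pvAAll r := by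
  rw [check_ascending]
  by_cases h : pvAAll r = true <;> simp [h]

-- A's counting loop over all single deletions, characterised
theorem pvA_count (r : List Int) :
    ((PySem.List.pyRange 0 (r.length : Int) 1).foldl
        (fun acc i =>
          acc + (if check_ascending (((PySem.List.pop? r i).map Prod.snd).getD []) false then (1 : Int)
                 else 0)) 0 > 0)
      ↔ ∃ k : Nat, k < r.length ∧ pvSafe (r.eraseIdx k) := by
  rw [PySem.List.foldl_add, PySem.List.sum_map_ite_one_zero]
  constructor
  · intro h
    have hpos : 0 < (PySem.List.pyRange 0 (r.length : Int) 1).countP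
        (fun i => check_ascending (((PySem.List.pop? r i).map Prod.snd).getD []) false) := by omega
    rw [List.countP_pos_iff] at hpos
    obtain ⟨ix, hmem, hp⟩ := hpos
    rw [PySem.List.mem_pyRange_one] at hmem
    have hcast : ix = (ix.toNat : Int) := by omega
    rw [hcast, PySem.List.pop?_natCast r ix.toNat (by omega)] at hp
    simp only [Option.map_some, Option.getD_some] at hp
    rw [check_ascending_false, pvAAll_iff] at hp
    exact ⟨ix.toNat, by omega, hp⟩
  · rintro ⟨k, hk, hsafe⟩
    have hpos : 0 < (PySem.List.pyRange 0 (r.length : Int) 1).countP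
        (fun i => check_ascending (((PySem.List.pop? r i).map Prod.snd).getD []) false) := by
      rw [List.countP_pos_iff]
      refine ⟨(k : Int), by rw [PySem.List.mem_pyRange_one]; omega, ?_⟩
      rw [PySem.List.pop?_natCast r k hk]
      simp only [Option.map_some, Option.getD_some]
      rw [check_ascending_false, pvAAll_iff]
      exact hsafe
    omega

-- ===== VERDICT (by name: the statement is the Claim_ definition above) =====
theorem check_ascending_spec : Claim_equal_check_ascending := by
  intro r check _
  unfold Spec_check_ascending
  cases check with
  | false =>
    rw [check_ascending_false]
    unfold check_ascending_alt
    cases hf : pvFirstBad r with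
    | none =>
      exact (pvAAll_iff r).mpr ((pvFirstBad_none_iff r).mp hf)
    | some i =>
      dsimp only
      rw [if_pos (by simp)]
      have hns : ¬ pvSafe r := fun hs => by
        rw [(pvFirstBad_none_iff r).mpr hs] at hf; cases hf
      cases hAA : pvAAll r
      · rfl
      · exact absurd ((pvAAll_iff r).mp hAA) hns
  | true =>
    cases hf : pvFirstBad r with
    | none =>
      have hA : pvAAll r = true := (pvAAll_iff r).mpr ((pvFirstBad_none_iff r).mp hf)
      rw [check_ascending]
      simp [hA, check_ascending_alt, hf]
    | some i =>
      have hA : ¬ pvAAll r = true := by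
        rw [pvAAll_iff]
        intro hs
        rw [(pvFirstBad_none_iff r).mpr hs] at hf
        cases hf
      obtain ⟨hlt, hbad⟩ := pvFirstBad_some r i hf
      rw [check_ascending, if_neg hA, if_pos rfl]
      unfold check_ascending_alt
      rw [hf]
      dsimp only
      rw [if_neg (show ¬((!true) = true) by simp)]
      rw [← List.eraseIdx_eq_take_drop_succ, ← List.eraseIdx_eq_take_drop_succ]
      by_cases hex : ∃ k : Nat, k < r.length ∧ pvSafe (r.eraseIdx k)
      · rw [if_pos ((pvA_count r).mpr hex)]
        obtain ⟨k, hk, hs⟩ := hex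
        have : pvSafe (r.eraseIdx i) ∨ pvSafe (r.eraseIdx (i + 1)) := by
          by_cases hki : k = i
          · exact Or.inl (hki ▸ hs)
          · by_cases hki1 : k = i + 1
            · exact Or.inr (hki1 ▸ hs)
            · exact absurd hs (pvErase_not_safe r i k hlt hbad hk hki hki1)
        rcases this with hs' | hs'
        · rw [(pvFirstBad_none_iff _).mpr hs']
          simp
        · rw [(pvFirstBad_none_iff _).mpr hs']
          simp
      · rw [if_neg (fun h => hex ((pvA_count r).mp h))]
        push Not at hex
        have h1 : pvFirstBad (r.eraseIdx i) ≠ none := fun hn =>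
          hex i (by omega) ((pvFirstBad_none_iff _).mp hn)
        have h2 : pvFirstBad (r.eraseIdx (i + 1)) ≠ none := fun hn =>
          hex (i + 1) (by omega) ((pvFirstBad_none_iff _).mp hn)
        cases hc1 : pvFirstBad (r.eraseIdx i) with
        | none => exact absurd hc1 h1
        | some a =>
          cases hc2 : pvFirstBad (r.eraseIdx (i + 1)) with
          | none => exact absurd hc2 h2
          | some b => simp
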